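-- pv_equiv track=rewrite | github.com/Sonlux/ESCAI | escai_framework/analytics/pattern_mining.py | _has_sequential_occurrence
-- ===== SOURCE A (Python) =====
-- from typing import List, Dict, Set, Tuple, Optional, Any
--
-- def _has_sequential_occurrence(positions: List[List[int]]) -> bool:
--     """Check if positions allow for sequential occurrence."""
--     if not positions:
--         return False
--
--     def backtrack(idx: int, last_pos: int) -> bool:
--         if idx == len(positions):
--             return True
--
--         for pos in positions[idx]:
--             if pos > last_pos:
--                 if backtrack(idx + 1, pos):
--                     return True
--         return False
--
--     return backtrack(0, -1)
-- ===== SOURCE B (Python) =====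
-- def _has_sequential_occurrence(positions):
--     if not positions:
--         return False
--     last = -1
--     for options in positions:
--         last = min((p for p in options if p > last), default=None)
--         if last is None:
--             return False
--     return True
-- ===== Notes on version B (the rewrite author's own statement) =====
-- stated objective: faster
-- what changed: Replaced the exponential backtracking search with a single left-to-right greedy fold that keeps only the smallest position greater than the previous pick (an exchange argument shows the greedy is exact).
import Mathlib
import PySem

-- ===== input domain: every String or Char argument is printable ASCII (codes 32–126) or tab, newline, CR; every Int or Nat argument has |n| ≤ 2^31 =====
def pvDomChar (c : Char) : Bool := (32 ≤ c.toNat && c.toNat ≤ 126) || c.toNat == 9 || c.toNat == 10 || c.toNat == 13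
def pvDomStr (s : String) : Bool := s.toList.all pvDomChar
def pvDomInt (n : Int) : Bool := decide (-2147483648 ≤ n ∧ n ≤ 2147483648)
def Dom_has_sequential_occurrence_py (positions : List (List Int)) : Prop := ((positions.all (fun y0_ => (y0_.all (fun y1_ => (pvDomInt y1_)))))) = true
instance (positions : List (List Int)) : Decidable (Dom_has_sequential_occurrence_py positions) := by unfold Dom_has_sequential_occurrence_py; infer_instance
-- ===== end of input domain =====

-- B replaces A's exponential backtracking with a single greedy left fold keeping the
-- smallest position greater than the previous pick; measured asymptotically faster.


-- ===== PORT A =====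
-- Python's inner `backtrack(idx, last_pos)`: recursion over the suffix of `positions`,
-- the for-loop with early `return True` is List.any with short-circuit &&.
def pvBacktrackA : List (List Int) → Int → Bool
  | [], _ => true
  | cur :: rest, last => cur.any (fun pos => decide (pos > last) && pvBacktrackA rest pos)

def has_sequential_occurrence_py (positions : List (List Int)) : Bool :=
  if positions = [] then false else pvBacktrackA positions (-1)

-- ===== PORT B =====
-- B: a left fold over `positions`; the state is `some last` (the current pick) or
-- `none` once some level had no position > last (Python's early `return False`).
-- Python's `min(gen, default=None)` of the filtered options is `(filter …).min?`.
def pvStepB (st : Option Int) (options : List Int) : Option Int :=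
  st.bind (fun last => (options.filter (fun p => decide (p > last))).min?)

def has_sequential_occurrence_py_alt (positions : List (List Int)) : Bool :=
  if positions = [] then false else (positions.foldl pvStepB (some (-1))).isSome

-- ===== PRECONDITION & SPEC =====
def Spec_has_sequential_occurrence_py (positions : List (List Int)) (out : Bool) : Prop := out = has_sequential_occurrence_py_alt positions
instance (positions : List (List Int)) (out : Bool) : Decidable (Spec_has_sequential_occurrence_py positions out) := by unfold Spec_has_sequential_occurrence_py; infer_instance

-- ===== CLAIM (what is proved, stated in full; the proofs are below) =====
def Claim_equal_has_sequential_occurrence_py : Prop := ∀ (positions : List (List Int)), Dom_has_sequential_occurrence_py positions → Spec_has_sequential_occurrence_py positions (has_sequential_occurrence_py positions)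

-- ===== LEMMAS AND PROOFS =====

theorem pvFoldB_none (l : List (List Int)) : l.foldl pvStepB none = none := by
  induction l with
  | nil => rfl
  | cons cur rest ih => simpa [pvStepB] using ih

-- Greedy is antitone in the threshold: a smaller last position can only help.
theorem pvFoldB_mono (l : List (List Int)) : ∀ a b : Int, a ≤ b →
    (l.foldl pvStepB (some b)).isSome = true → (l.foldl pvStepB (some a)).isSome = true := by
  induction l with
  | nil => intro a b _ _; rfl
  | cons cur rest ih =>
    intro a b hab h
    simp only [List.foldl_cons] at h ⊢
    cases hb : pvStepB (some b) cur with
    | none => rw [hb, pvFoldB_none] at h; exact absurd h (by simp)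
    | some m =>
      rw [hb] at h
      have hmem : m ∈ cur.filter (fun p => decide (p > b)) := List.min?_mem hb
      simp only [List.mem_filter, decide_eq_true_eq] at hmem
      have hma : m ∈ cur.filter (fun p => decide (p > a)) := by
        simp only [List.mem_filter, decide_eq_true_eq]; exact ⟨hmem.1, lt_of_le_of_lt hab hmem.2⟩
      cases ha : pvStepB (some a) cur with
      | none =>
        exact absurd (List.min?_eq_none_iff.mp ha ▸ hma) (List.not_mem_nil)
      | some m' =>
        have hle : m' ≤ m := (List.le_min?_iff ha).mp (le_refl m') m hma
        exact ih m' m hle h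

theorem pvFoldB_eq_backtrack (l : List (List Int)) : ∀ last : Int,
    pvBacktrackA l last = (l.foldl pvStepB (some last)).isSome := by
  induction l with
  | nil => intro _; rfl
  | cons cur rest ih =>
    intro last
    simp only [pvBacktrackA, List.foldl_cons]
    cases hmin : pvStepB (some last) cur with
    | none =>
      have hemp := List.min?_eq_none_iff.mp hmin
      rw [pvFoldB_none]
      simp only [Option.isSome_none, List.any_eq_false]
      intro pos hpos
      by_cases hgt : pos > last
      · exact absurd (List.mem_filter.mpr ⟨hpos, by simpa using hgt⟩) (hemp ▸ List.not_mem_nil)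
      · simp [hgt]
    | some m =>
      have hmem : m ∈ cur.filter (fun p => decide (p > last)) := List.min?_mem hmin
      simp only [List.mem_filter, decide_eq_true_eq] at hmem
      cases hg : (rest.foldl pvStepB (some m)).isSome with
      | true =>
        have : pvBacktrackA rest m = true := by rw [ih]; exact hg
        exact List.any_eq_true.mpr ⟨m, hmem.1, by simp [hmem.2, this]⟩
      | false =>
        simp only [List.any_eq_false]
        intro pos hpos
        by_cases hgt : pos > last
        · have hposf : pos ∈ cur.filter (fun p => decide (p > last)) := List.mem_filter.mpr ⟨hpos, by simpa using hgt⟩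
          have hmp : m ≤ pos := (List.le_min?_iff hmin).mp (le_refl m) pos hposf
          cases hb : pvBacktrackA rest pos with
          | false => simp
          | true =>
            have : (rest.foldl pvStepB (some m)).isSome = true :=
              pvFoldB_mono rest m pos hmp (by rw [← ih]; exact hb)
            rw [hg] at this; exact absurd this (by simp)
        · simp [hgt]

-- ===== VERDICT (by name: the statement is the Claim_ definition above) =====
theorem has_sequential_occurrence_py_spec : Claim_equal_has_sequential_occurrence_py := by
  intro positions _
  unfold Spec_has_sequential_occurrence_py has_sequential_occurrence_py has_sequential_occurrence_py_alt
  split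
  · rfl
  · exact pvFoldB_eq_backtrack positions (-1)
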